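-- pv_equiv track=rewrite | github.com/xiaohanwang01/GILGeo | baselines/XLBoostGeo/run.py | get_r_hops
-- ===== SOURCE A (Python) =====
-- def get_r_hops(trace):
--     r_hop = {}
--     for route in trace:
--         for i, r in enumerate(route[:-1]):
--             if len(r) != 0:
--                 key = list(r.keys())[0]
--                 hop = len(route)-i-1
--                 if key not in r_hop.keys() or r_hop[key] > hop:
--                     r_hop[key] = hop
--     return r_hop
-- ===== SOURCE B (Python) =====
-- def get_r_hops(trace):
--     groups = {}
--     for route in trace:
--         for i, r in enumerate(route[:-1]):
--             if len(r) != 0: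
--                 key = list(r.keys())[0]
--                 groups[key] = groups.get(key, []) + [len(route) - i - 1]
--     return {k: min(v) for k, v in groups.items()}
-- ===== Notes on version B (the rewrite author's own statement) =====
-- stated objective: alternative
-- what changed: Instead of threading a running minimum per key through the scan, B first groups every observed hop into a per-key list (dict of lists) and then reduces each list with min in a separate comprehension pass.
import Mathlib
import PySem

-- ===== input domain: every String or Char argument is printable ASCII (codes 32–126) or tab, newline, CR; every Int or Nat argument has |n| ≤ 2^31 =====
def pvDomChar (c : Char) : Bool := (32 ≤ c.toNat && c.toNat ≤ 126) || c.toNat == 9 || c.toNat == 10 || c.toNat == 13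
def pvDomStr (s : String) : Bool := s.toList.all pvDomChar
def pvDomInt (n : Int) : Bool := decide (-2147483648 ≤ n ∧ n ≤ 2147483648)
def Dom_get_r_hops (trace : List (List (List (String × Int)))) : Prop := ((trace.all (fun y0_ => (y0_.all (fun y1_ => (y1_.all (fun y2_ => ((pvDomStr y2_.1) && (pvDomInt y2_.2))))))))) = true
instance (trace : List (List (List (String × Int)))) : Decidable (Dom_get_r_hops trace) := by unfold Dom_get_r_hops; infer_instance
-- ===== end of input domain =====

-- B keeps, per key, the list of ALL observed hops and takes min in a second pass,
-- instead of threading a running minimum through the loop (objective: alternative decomposition).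

-- ===== PORT A =====
def get_r_hops (trace : List (List (List (String × Int)))) : List (String × Int) :=
  (trace.foldl (fun r_hop route =>
    (PySem.List.enumerate (PySem.List.slice route none (some (-1))) 0).foldl
      (fun r_hop ir =>
        if ir.2.length ≠ 0 then
          -- r ≠ [] is guarded, so list(r.keys())[0] exists; the .getD "" is never taken
          let key := (PySem.List.pyGet? (ir.2.map Prod.fst) 0).getD ""
          let hop : Int := (route.length : Int) - ir.1 - 1
          if !(r_hop.contains key) || decide (r_hop.getD key 0 > hop) then
            r_hop.insert key hop
          else r_hop
        else r_hop)
      r_hop)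
    PySem.Dict.empty).items

-- ===== PORT B =====
-- B-side helper: min(v); B only applies it to nonempty hop lists, so .getD 0 is never taken
def pyminInt (l : List Int) : Int := (PySem.List.min? l (fun x => x)).getD 0

def get_r_hops_alt (trace : List (List (List (String × Int)))) : List (String × Int) :=
  let groups :=
    trace.foldl (fun groups route =>
      (PySem.List.enumerate (PySem.List.slice route none (some (-1))) 0).foldl
        (fun groups ir =>
          if ir.2.length ≠ 0 then
            let key := (PySem.List.pyGet? (ir.2.map Prod.fst) 0).getD ""
            groups.insert key (groups.getD key [] ++ [(route.length : Int) - ir.1 - 1])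
          else groups)
        groups)
      PySem.Dict.empty
  (groups.items.foldl (fun d p => d.insert p.1 (pyminInt p.2)) PySem.Dict.empty).items

-- ===== PRECONDITION & SPEC =====
def Spec_get_r_hops (trace : List (List (List (String × Int)))) (out : List (String × Int)) : Prop := out = get_r_hops_alt trace
instance (trace : List (List (List (String × Int)))) (out : List (String × Int)) : Decidable (Spec_get_r_hops trace out) := by unfold Spec_get_r_hops; infer_instance

-- ===== CLAIM (what is proved, stated in full; the proofs are below) =====
def Claim_equal_get_r_hops : Prop := ∀ (trace : List (List (List (String × Int)))), Dom_get_r_hops trace → Spec_get_r_hops trace (get_r_hops trace)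

-- ===== LEMMAS AND PROOFS =====

/-- Invariant tying A's running-minimum dict to B's groups dict:
same keys in the same order, A's value = min of B's (nonempty) hop list. -/
def pvInv (d : PySem.Dict String Int) (g : PySem.Dict String (List Int)) : Prop :=
  d.items = g.items.map (fun p => (p.1, pyminInt p.2)) ∧
  g.keys.Nodup ∧ (∀ p ∈ g.items, p.2 ≠ [])

lemma pymin_singleton (x : Int) : pyminInt [x] = x := by
  simp [pyminInt, PySem.List.min?_id_cons]

lemma pymin_append (l : List Int) (h : l ≠ []) (x : Int) :
    pyminInt (l ++ [x]) = min (pyminInt l) x := by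
  obtain ⟨a, t, rfl⟩ := List.exists_cons_of_ne_nil h
  simp [pyminInt, PySem.List.min?_id_cons, List.foldl_append]

lemma keys_eq_of_pvInv {d : PySem.Dict String Int} {g : PySem.Dict String (List Int)}
    (h : pvInv d g) : d.keys = g.keys := by
  simp only [PySem.Dict.keys]
  rw [h.1, List.map_map]
  rfl

lemma pvInv_step (d : PySem.Dict String Int) (g : PySem.Dict String (List Int))
    (key : String) (hop : Int) (h : pvInv d g) :
    pvInv (if !(d.contains key) || decide (d.getD key 0 > hop) then d.insert key hop else d)
          (g.insert key (g.getD key [] ++ [hop])) := by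
  obtain ⟨hitems, hnd, hne⟩ := h
  have hkeys : d.keys = g.keys := keys_eq_of_pvInv ⟨hitems, hnd, hne⟩
  have hdnd : d.keys.Nodup := by rw [hkeys]; exact hnd
  have hcont : d.contains key = g.contains key := by
    rw [PySem.Dict.contains_eq_decide_mem_keys, PySem.Dict.contains_eq_decide_mem_keys, hkeys]
  by_cases hc : g.contains key = true
  · rcases hget : g.get? key with _ | v
    · exact absurd ((PySem.Dict.get?_eq_none_iff_contains g key).mp hget) (by simp [hc])
    have hv : (key, v) ∈ g.items := PySem.Dict.mem_items_of_get?_eq_some g hget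
    have hDv : g.getD key [] = v := PySem.Dict.getD_of_get?_eq_some g [] hget
    have hvne : v ≠ [] := hne _ hv
    have hdg : d.getD key 0 = pyminInt v :=
      PySem.Dict.getD_of_mem_items d (by rw [hitems]; exact List.mem_map.mpr ⟨_, hv, rfl⟩) hdnd 0
    have hptwise : ∀ p ∈ g.items, p.1 = key → p.2 = v := by
      intro p hp hk
      have h2 := PySem.Dict.getD_of_mem_items g (k := p.1) (v := p.2) (by simpa using hp) hnd []
      rw [hk, hDv] at h2
      exact h2.symm
    have hBitems := PySem.Dict.items_insert_of_contains g (g.getD key [] ++ [hop]) hc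
    refine ⟨?_, ?_, ?_⟩
    · rw [hBitems, hDv]
      by_cases hlt : d.getD key 0 > hop
      · rw [if_pos (by simp [hlt])]
        rw [PySem.Dict.items_insert_of_contains d hop (by rw [hcont]; exact hc), hitems,
            List.map_map, List.map_map]
        apply List.map_congr_left
        intro p hp
        simp only [Function.comp_apply]
        by_cases hk : p.1 = key
        · have hp2 : p.2 = v := hptwise p hp hk
          have hmin : pyminInt (v ++ [hop]) = hop := by
            rw [pymin_append v hvne hop]
            rw [hdg] at hlt
            omega
          simp [hk, hmin]
        · simp [hk]
      · rw [if_neg (by simp [hcont, hc, hlt])]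
        rw [hitems, List.map_map]
        apply List.map_congr_left
        intro p hp
        simp only [Function.comp_apply]
        by_cases hk : p.1 = key
        · have hp2 : p.2 = v := hptwise p hp hk
          have hmin : pyminInt (v ++ [hop]) = pyminInt v := by
            rw [pymin_append v hvne hop]
            rw [hdg] at hlt
            omega
          simp [hk, hp2, hmin]
        · simp [hk]
    · rw [PySem.Dict.keys_insert_of_contains g _ hc]; exact hnd
    · intro p hp
      rcases (PySem.Dict.mem_items_insert g _ _ p).mp hp with h1 | h1
      · subst h1; simp
      · exact hne _ h1.1
  · have hc' : g.contains key = false := by simpa using hc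
    rw [if_pos (by simp [hcont, hc'])]
    have hgD : g.getD key [] = [] := PySem.Dict.getD_of_not_contains g [] hc'
    refine ⟨?_, ?_, ?_⟩
    · rw [PySem.Dict.items_insert_of_not_contains d hop (by rw [hcont]; exact hc'),
          PySem.Dict.items_insert_of_not_contains g _ hc', hitems, List.map_append, hgD]
      simp [pymin_singleton]
    · rw [PySem.Dict.keys_insert_of_not_contains g _ hc']
      have hknot : key ∉ g.keys := by
        intro hmem
        have h3 := (PySem.Dict.contains_iff_mem_keys g key).mpr hmem
        rw [hc'] at h3
        exact Bool.false_ne_true h3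
      simp [List.nodup_append, hnd]
      intro a ha heq
      exact hknot (heq ▸ ha)
    · intro p hp
      rcases (PySem.Dict.mem_items_insert g _ _ p).mp hp with h1 | h1
      · subst h1; simp [hgD]
      · exact hne _ h1.1

lemma foldl_pvInv {α : Type} (fA : PySem.Dict String Int → α → PySem.Dict String Int)
    (fB : PySem.Dict String (List Int) → α → PySem.Dict String (List Int))
    (hstep : ∀ d g e, pvInv d g → pvInv (fA d e) (fB g e)) :
    ∀ (l : List α) (d : PySem.Dict String Int) (g : PySem.Dict String (List Int)),
      pvInv d g → pvInv (l.foldl fA d) (l.foldl fB g) := by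
  intro l
  induction l with
  | nil => intro d g h; exact h
  | cons e t ih => intro d g h; exact ih _ _ (hstep d g e h)

lemma pvInv_empty : pvInv PySem.Dict.empty PySem.Dict.empty := by
  refine ⟨rfl, ?_, ?_⟩
  · simp [PySem.Dict.keys_empty]
  · intro p hp
    simp [PySem.Dict.empty] at hp

def pvFoldA (trace : List (List (List (String × Int)))) : PySem.Dict String Int :=
  trace.foldl (fun r_hop route =>
    (PySem.List.enumerate (PySem.List.slice route none (some (-1))) 0).foldl
      (fun r_hop ir =>
        if ir.2.length ≠ 0 then
          let key := (PySem.List.pyGet? (ir.2.map Prod.fst) 0).getD ""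
          let hop : Int := (route.length : Int) - ir.1 - 1
          if !(r_hop.contains key) || decide (r_hop.getD key 0 > hop) then
            r_hop.insert key hop
          else r_hop
        else r_hop)
      r_hop)
    PySem.Dict.empty

def pvFoldB (trace : List (List (List (String × Int)))) : PySem.Dict String (List Int) :=
  trace.foldl (fun groups route =>
    (PySem.List.enumerate (PySem.List.slice route none (some (-1))) 0).foldl
      (fun groups ir =>
        if ir.2.length ≠ 0 then
          let key := (PySem.List.pyGet? (ir.2.map Prod.fst) 0).getD ""
          groups.insert key (groups.getD key [] ++ [(route.length : Int) - ir.1 - 1])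
        else groups)
      groups)
    PySem.Dict.empty

lemma pvInv_trace (trace : List (List (List (String × Int)))) :
    pvInv (pvFoldA trace) (pvFoldB trace) := by
  unfold pvFoldA pvFoldB
  apply foldl_pvInv
  · intro d g route h
    apply foldl_pvInv
    · intro d g ir h
      by_cases hr : ir.2.length ≠ 0
      · simp only [if_pos hr]
        exact pvInv_step d g _ _ h
      · simp only [if_neg hr]
        exact h
    · exact h
  · exact pvInv_empty

-- ===== VERDICT (by name: the statement is the Claim_ definition above) =====
theorem get_r_hops_spec : Claim_equal_get_r_hops := by
  intro trace _
  show get_r_hops trace = get_r_hops_alt trace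
  obtain ⟨hitems, hnd, -⟩ := pvInv_trace trace
  have h1 : get_r_hops trace = (pvFoldA trace).items := rfl
  have h2 : get_r_hops_alt trace =
      ((pvFoldB trace).items.foldl (fun d p => d.insert p.1 (pyminInt p.2))
        PySem.Dict.empty).items := rfl
  have hfresh := PySem.Dict.items_foldl_insert_fresh
    (l := (pvFoldB trace).items)
    (k := fun p : String × List Int => p.1)
    (v := fun p : String × List Int => pyminInt p.2)
    (d := PySem.Dict.empty)
    (fun a _ => PySem.Dict.contains_empty a.1)
    (by simpa [PySem.Dict.keys] using hnd)
  simp only [] at hfresh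
  rw [h1, h2, hfresh]
  simpa using hitems
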